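-- pv_equiv track=rewrite | github.com/Syasayanlar/CE104 | Lab9/ex_3.py | doOperations
-- ===== SOURCE A (Python) =====
-- def doOperations(A):
--     sum_pos = 0
--     sum_neg = 0
--     num_zeros = 0
--     for r in A:
--         for el in r:
--             if el == 0:
--                 num_zeros += 1
--             elif el < 0:
--                 sum_neg += el
--             elif el > 0:
--                 sum_pos += el
--
--     return num_zeros, sum_neg, sum_pos
-- ===== SOURCE B (Python) =====
-- def doOperations(A):
--     flat = [el for r in A for el in r]
--     return (flat.count(0),
--             sum(el for el in flat if el < 0),
--             sum(el for el in flat if el > 0))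
-- ===== Notes on version B (the rewrite author's own statement) =====
-- stated objective: idiomatic
-- what changed: Replaces the fused single-pass elif classification with a flatten followed by three independent aggregate passes: a count of zeros and two filtered sums.
import Mathlib
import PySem

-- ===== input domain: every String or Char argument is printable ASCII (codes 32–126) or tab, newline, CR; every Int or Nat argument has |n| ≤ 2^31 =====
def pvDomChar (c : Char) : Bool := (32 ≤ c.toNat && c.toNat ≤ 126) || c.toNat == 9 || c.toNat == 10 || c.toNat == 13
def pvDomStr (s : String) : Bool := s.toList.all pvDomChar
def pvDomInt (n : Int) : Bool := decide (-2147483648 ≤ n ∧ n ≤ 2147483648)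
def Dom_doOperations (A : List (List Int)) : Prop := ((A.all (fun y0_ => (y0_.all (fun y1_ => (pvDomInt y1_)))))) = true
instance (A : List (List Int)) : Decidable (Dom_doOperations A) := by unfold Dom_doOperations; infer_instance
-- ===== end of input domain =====

-- B flattens the matrix and computes each aggregate in an independent pass (count of zeros,
-- sum of negatives, sum of positives) instead of A's fused single-loop elif classification.


-- ===== PORT A =====
-- state (sum_pos, sum_neg, num_zeros), as in A
def doOperations (A : List (List Int)) : Int × Int × Int :=
  let st := A.foldl (fun (st : Int × Int × Int) r =>
    r.foldl (fun (st : Int × Int × Int) el =>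
      if el == 0 then (st.1, st.2.1, st.2.2 + 1)
      else if el < 0 then (st.1, st.2.1 + el, st.2.2)
      else if el > 0 then (st.1 + el, st.2.1, st.2.2)
      else st) st) (0, 0, 0)
  (st.2.2, st.2.1, st.1)

-- ===== PORT B =====
def doOperations_alt (A : List (List Int)) : Int × Int × Int :=
  let flat := A.flatMap (fun r => r)
  (PySem.List.count flat 0,
   (flat.filter (fun el => el < 0)).sum,
   (flat.filter (fun el => el > 0)).sum)

-- ===== PRECONDITION & SPEC =====
def Spec_doOperations (A : List (List Int)) (out : Int × Int × Int) : Prop := out = doOperations_alt A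
instance (A : List (List Int)) (out : Int × Int × Int) : Decidable (Spec_doOperations A out) := by unfold Spec_doOperations; infer_instance

-- ===== CLAIM (what is proved, stated in full; the proofs are below) =====
def Claim_equal_doOperations : Prop := ∀ (A : List (List Int)), Dom_doOperations A → Spec_doOperations A (doOperations A)

-- ===== LEMMAS AND PROOFS =====

theorem doOperations_inner (r : List Int) (st : Int × Int × Int) :
    r.foldl (fun (st : Int × Int × Int) el =>
      if el == 0 then (st.1, st.2.1, st.2.2 + 1)
      else if el < 0 then (st.1, st.2.1 + el, st.2.2)
      else if el > 0 then (st.1 + el, st.2.1, st.2.2)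
      else st) st
    = (st.1 + (r.filter (fun el => el > 0)).sum,
       st.2.1 + (r.filter (fun el => el < 0)).sum,
       st.2.2 + (r.count 0 : Int)) := by
  induction r generalizing st with
  | nil => simp
  | cons x xs ih =>
    simp only [List.foldl_cons, List.filter_cons, List.count_cons, ih]
    by_cases h0 : x = 0
    · simp [h0]; omega
    · by_cases hn : x < 0
      · have h1 : ¬ x > 0 := by omega
        simp [h0, hn, h1]
        omega
      · have hp : x > 0 := by omega
        simp [h0, hn, hp]
        ring

theorem doOperations_outer (A : List (List Int)) (st : Int × Int × Int) :
    A.foldl (fun (st : Int × Int × Int) r =>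
      r.foldl (fun (st : Int × Int × Int) el =>
        if el == 0 then (st.1, st.2.1, st.2.2 + 1)
        else if el < 0 then (st.1, st.2.1 + el, st.2.2)
        else if el > 0 then (st.1 + el, st.2.1, st.2.2)
        else st) st) st
    = (st.1 + ((A.flatMap (fun r => r)).filter (fun el => el > 0)).sum,
       st.2.1 + ((A.flatMap (fun r => r)).filter (fun el => el < 0)).sum,
       st.2.2 + ((A.flatMap (fun r => r)).count 0 : Int)) := by
  induction A generalizing st with
  | nil => simp
  | cons r rs ih =>
    rw [List.foldl_cons, doOperations_inner, ih]
    simp only [List.flatMap_cons, List.filter_append, List.sum_append, List.count_append]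
    refine Prod.ext (by simp; ring) (Prod.ext (by simp; ring) ?_)
    simp
    omega

-- ===== VERDICT (by name: the statement is the Claim_ definition above) =====
theorem doOperations_spec : Claim_equal_doOperations := by
  intro A _
  show _ = _
  unfold doOperations doOperations_alt
  rw [doOperations_outer]
  simp [PySem.List.count]
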